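-- pv_equiv track=rewrite | github.com/sleirsgoevy/brutejudge | brutejudge/_http/html2md.py | validate_tag
-- ===== SOURCE A (Python) =====
-- def validate_tag(data):
--     data = data.strip()
--     if data.startswith('/'): data = data[1:]
--     if data.endswith('/'): data = data[:-1]
--     i = 0
--     while i < len(data):
--         j = min(data.find("'", i) % (len(data) + 1), data.find('"', i) % (len(data) + 1))
--         if not set(data[i:j]).issubset(set('abcdefghijklmnopqrstuvwxyzABCDEFGHIJKLMNOPQRSTUVWXYZ0123456789- =\n')):
--             return False
--         if j == len(data): return True
--         i = j + 1
--         j = data.find(data[j], j + 1) % (len(data) + 1)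
--         if j == len(data):
--             return False
--         i = j + 1
--     return i == len(data)
-- ===== SOURCE B (Python) =====
-- ALLOWED = 'abcdefghijklmnopqrstuvwxyzABCDEFGHIJKLMNOPQRSTUVWXYZ0123456789- =\n'
--
-- def validate_tag(data):
--     data = data.strip()
--     if data.startswith('/'): data = data[1:]
--     if data.endswith('/'): data = data[:-1]
--     quote = None
--     for c in data:
--         if quote is not None:
--             if c == quote:
--                 quote = None
--         elif c in '\'"':
--             quote = c
--         elif c not in ALLOWED:
--             return False
--     return quote is None
-- ===== Notes on version B (the rewrite author's own statement) =====
-- stated objective: simpler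
-- what changed: Replaces A's index-jumping loop of repeated str.find calls (with the -1 % (len+1) trick and set().issubset segment checks) by a single left-to-right character scan that tracks which quote character, if any, is currently open.
import Mathlib
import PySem

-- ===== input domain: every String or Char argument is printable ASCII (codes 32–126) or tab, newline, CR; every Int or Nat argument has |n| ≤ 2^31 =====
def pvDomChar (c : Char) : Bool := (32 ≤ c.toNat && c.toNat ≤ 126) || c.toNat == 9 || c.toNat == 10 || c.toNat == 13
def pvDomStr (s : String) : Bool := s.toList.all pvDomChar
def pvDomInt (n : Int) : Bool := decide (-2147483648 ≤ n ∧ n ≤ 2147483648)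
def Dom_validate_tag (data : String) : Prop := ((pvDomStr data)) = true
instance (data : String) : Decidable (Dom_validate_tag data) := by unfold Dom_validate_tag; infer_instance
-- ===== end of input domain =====

-- B replaces A's index-jumping loop of repeated str.find calls by a single character scan
-- holding the currently open quote character; objective: simpler.

-- ===== PORT A =====
-- set('abc…') of A's allowed-character string literal
def pvAllowedA : List Char :=
  "abcdefghijklmnopqrstuvwxyzABCDEFGHIJKLMNOPQRSTUVWXYZ0123456789- =\n".toList

-- A's `j = min(data.find("'", i) % (len+1), data.find('"', i) % (len+1))`
def pvFindJ (l : List Char) (i : Int) : Int :=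
  min (PySem.Int.mod (PySem.Chars.findFrom l ['\''] i none) ((l.length : Int) + 1))
      (PySem.Int.mod (PySem.Chars.findFrom l ['"'] i none) ((l.length : Int) + 1))

-- the while loop of A; fuel (len+1) only makes the recursion structural, it is never exhausted
def validateLoopA (l : List Char) : Nat → Nat → Bool
  | _, 0 => false
  | i, fuel+1 =>
    if i < l.length then
      if !(PySem.Set.issubset
             (PySem.Set.ofList (PySem.List.slice l (some (i : Int)) (some (pvFindJ l (i : Int)))))
             (PySem.Set.ofList pvAllowedA)) then false
      else if pvFindJ l (i : Int) == (l.length : Int) then true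
      else
        match PySem.List.pyGet? l (pvFindJ l (i : Int)) with
        | none => false  -- unreachable: 0 ≤ j < len(data) in this branch
        | some q =>
          if PySem.Int.mod (PySem.Chars.findFrom l [q] (pvFindJ l (i : Int) + 1) none)
               ((l.length : Int) + 1) == (l.length : Int) then false
          else validateLoopA l
            (PySem.Int.mod (PySem.Chars.findFrom l [q] (pvFindJ l (i : Int) + 1) none)
               ((l.length : Int) + 1) + 1).toNat fuel
    else decide ((i : Int) = (l.length : Int))

def validate_tag (data : String) : Bool :=
  let s := PySem.Str.strip data
  let s := if PySem.Str.startswith s "/" then PySem.Str.slice s (some 1) none else s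
  let s := if PySem.Str.endswith s "/" then PySem.Str.slice s none (some (-1)) else s
  validateLoopA s.toList 0 (s.toList.length + 1)

-- ===== PORT B =====
-- B's module constant ALLOWED
def pvAllowedB : List Char :=
  "abcdefghijklmnopqrstuvwxyzABCDEFGHIJKLMNOPQRSTUVWXYZ0123456789- =\n".toList

def pvIsQuote (c : Char) : Bool := c == '\'' || c == '"'

-- B's for loop: one pass, `quote` is the currently open quote character (or none)
def scanB : List Char → Option Char → Bool
  | [], quote => quote.isNone
  | c :: rest, some q => if c == q then scanB rest none else scanB rest (some q)
  | c :: rest, none =>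
    if pvIsQuote c then scanB rest (some c)
    else if !(pvAllowedB.contains c) then false
    else scanB rest none

def validate_tag_alt (data : String) : Bool :=
  let s := PySem.Str.strip data
  let s := if PySem.Str.startswith s "/" then PySem.Str.slice s (some 1) none else s
  let s := if PySem.Str.endswith s "/" then PySem.Str.slice s none (some (-1)) else s
  scanB s.toList none

-- ===== PRECONDITION & SPEC =====
def Spec_validate_tag (data : String) (out : Bool) : Prop := out = validate_tag_alt data
instance (data : String) (out : Bool) : Decidable (Spec_validate_tag data out) := by
  unfold Spec_validate_tag; infer_instance

-- ===== CLAIM (what is proved, stated in full; the proofs are below) =====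
def Claim_equal_validate_tag : Prop :=
  ∀ (data : String), Dom_validate_tag data → Spec_validate_tag data (validate_tag data)

-- ===== LEMMAS AND PROOFS =====

-- a one-character list is an infix iff the character occurs
lemma infix_singleton (c : Char) (t : List Char) : [c] <:+: t ↔ c ∈ t := by
  constructor
  · intro h; exact h.subset (List.mem_singleton_self c)
  · intro h
    obtain ⟨u, v, rfl⟩ := List.append_of_mem h
    exact ⟨u, v, by simp⟩

-- a one-character list is a prefix iff it is the head
lemma prefix_singleton_iff (c : Char) (u : List Char) : [c] <+: u ↔ u.head? = some c := by
  constructor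
  · rintro ⟨r, rfl⟩; rfl
  · intro h
    cases u with
    | nil => simp at h
    | cons d r => simp at h; exact ⟨r, by simp [h]⟩

-- Python str.find for a single character, as List.findIdx?
lemma find_single (t : List Char) (c : Char) :
    PySem.Chars.find t [c] =
      match t.findIdx? (· == c) with
      | none => -1
      | some k => (k : Int) := by
  have h0 : (0 : Nat) ≤ t.length := Nat.zero_le _
  rw [← PySem.Chars.findFrom_zero]
  cases h : t.findIdx? (· == c) with
  | none =>
    have hnm : c ∉ t := by
      rw [List.findIdx?_eq_none_iff] at h
      intro hc; simpa using h c hc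
    have := (PySem.Chars.findFrom_natCast_eq_neg_one_iff t [c] 0 h0).2
      (by simpa [infix_singleton] using hnm)
    simpa using this
  | some k =>
    rw [List.findIdx?_eq_some_iff_getElem] at h
    obtain ⟨hk, hck, hmin⟩ := h
    have hck' : t[k] = c := by simpa using hck
    have hne : PySem.Chars.findFrom t [c] ((0 : Nat) : Int) ≠ -1 := by
      intro hcon
      rw [PySem.Chars.findFrom_natCast_eq_neg_one_iff t [c] 0 h0] at hcon
      exact hcon (by simp only [List.drop_zero, infix_singleton]; exact hck' ▸ List.getElem_mem hk)
    obtain ⟨hge, hpre, hminF⟩ := PySem.Chars.findFrom_natCast_spec t [c] 0 h0 hne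
    set F := PySem.Chars.findFrom t [c] ((0 : Nat) : Int) with hF
    have hFel : t[F.toNat]? = some c := by
      rw [← List.head?_drop]
      exact (prefix_singleton_iff c _).1 hpre
    have hFlt : F.toNat < t.length := by
      rcases List.getElem?_eq_some_iff.1 hFel with ⟨hh, _⟩
      exact hh
    have hFval : t[F.toNat]'hFlt = c := by
      rcases List.getElem?_eq_some_iff.1 hFel with ⟨hh, hv⟩; exact hv
    have heq : F.toNat = k := by
      rcases Nat.lt_trichotomy F.toNat k with hlt | heq | hgt
      · exact absurd hFval (by simpa using hmin F.toNat hlt)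
      · exact heq
      · exfalso
        exact hminF k (Nat.zero_le _) hgt
          ((prefix_singleton_iff c _).2 (by rw [List.head?_drop]; exact List.getElem?_eq_some_iff.2 ⟨hk, hck'⟩))
    have : F = (k : Int) := by omega
    show PySem.Chars.findFrom t [c] 0 = (k : Int)
    exact_mod_cast this

-- the two mod cases of A's `find(..) % (len+1)` trick
lemma mod_neg_one (n : Nat) : PySem.Int.mod (-1) ((n : Int) + 1) = (n : Int) := by
  rw [PySem.Int.mod_eq_emod_of_pos (by omega)]
  calc (-1 : Int) % ((n : Int) + 1)
      = ((-1) + ((n : Int) + 1)) % ((n : Int) + 1) := (Int.add_emod_right _ _).symm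
    _ = (n : Int) % ((n : Int) + 1) := by norm_num
    _ = (n : Int) := Int.emod_eq_of_lt (by omega) (by omega)

lemma mod_small (a : Int) (n : Nat) (h0 : 0 ≤ a) (h : a < (n : Int) + 1) :
    PySem.Int.mod a ((n : Int) + 1) = a := by
  rw [PySem.Int.mod_eq_emod_of_pos (by omega)]
  exact Int.emod_eq_of_lt h0 h

-- min of the first ' index and the first " index is the first quote index
def optMin : Option Nat → Option Nat → Option Nat
  | none, o => o
  | o, none => o
  | some a, some b => some (min a b)

lemma findIdx?_or (p q : Char → Bool) (t : List Char) :
    t.findIdx? (fun c => p c || q c) = optMin (t.findIdx? p) (t.findIdx? q) := by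
  induction t with
  | nil => rfl
  | cons c t ih =>
    simp only [List.findIdx?_cons, ih]
    cases hp : p c <;> cases hq : q c <;>
      simp [optMin] <;>
      cases t.findIdx? p <;> cases t.findIdx? q <;> simp

-- A's subset check is "every character allowed"
lemma subset_eq_all (seg : List Char) :
    PySem.Set.issubset (PySem.Set.ofList seg) (PySem.Set.ofList pvAllowedA)
      = seg.all (fun c => pvAllowedB.contains c) := by
  rw [Bool.eq_iff_iff, PySem.Set.issubset_iff, List.all_eq_true]
  simp only [PySem.Set.mem_ofList, List.contains_eq_mem, decide_eq_true_eq]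
  rfl

-- B's scan through a quote-free block
lemma scanB_append_clean (u v : List Char) (hu : ∀ c ∈ u, pvIsQuote c = false) :
    scanB (u ++ v) none =
      if u.all (fun c => pvAllowedB.contains c) then scanB v none else false := by
  induction u with
  | nil => simp
  | cons c u ih =>
    have hc := hu c (List.mem_cons_self)
    simp only [List.cons_append, scanB, hc, Bool.false_eq_true, if_false, List.all_cons]
    by_cases h : pvAllowedB.contains c = true
    · simp only [h, Bool.not_true, Bool.false_eq_true, if_false, Bool.true_and]
      exact ih (fun d hd => hu d (List.mem_cons_of_mem _ hd))
    · simp only [Bool.not_eq_true] at h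
      simp only [h, Bool.not_false, if_true, Bool.false_and, Bool.false_eq_true, if_false]

-- B's scan inside an open quote skips characters other than the quote
lemma scanB_append_quoted (u v : List Char) (q : Char) (hu : ∀ c ∈ u, c ≠ q) :
    scanB (u ++ v) (some q) = scanB v (some q) := by
  induction u with
  | nil => rfl
  | cons c u ih =>
    have hc : (c == q) = false := by
      simpa using hu c (List.mem_cons_self)
    simp only [List.cons_append, scanB, hc, Bool.false_eq_true, if_false]
    exact ih (fun d hd => hu d (List.mem_cons_of_mem _ hd))

-- A's `find(c, i) % (len+1)`, as the first occurrence of c in the suffix (len when absent)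
lemma findmod_val (l : List Char) (i : Nat) (hi : i ≤ l.length) (c : Char) :
    PySem.Int.mod (PySem.Chars.findFrom l [c] (i : Int) none) ((l.length : Int) + 1)
      = match (l.drop i).findIdx? (· == c) with
        | none => (l.length : Int)
        | some k => ((i + k : Nat) : Int) := by
  rw [PySem.Chars.findFrom_natCast l [c] i hi, find_single]
  cases h : (l.drop i).findIdx? (· == c) with
  | none =>
    simp only [h, if_pos rfl]
    exact mod_neg_one l.length
  | some k =>
    have hk : k < (l.drop i).length := by
      rcases List.findIdx?_eq_some_iff_getElem.1 h with ⟨hk, _⟩; exact hk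
    have hk' : i + k < l.length := by rw [List.length_drop] at hk; omega
    simp only [h]
    rw [if_neg (by omega)]
    rw [show (i : Int) + (k : Int) = ((i + k : Nat) : Int) by push_cast; ring]
    exact mod_small _ _ (by positivity) (by exact_mod_cast by omega)

-- the `min` of A's two finds is the first quote position in the suffix
lemma j_val (l : List Char) (i : Nat) (hi : i ≤ l.length) :
    pvFindJ l (i : Int)
      = match (l.drop i).findIdx? pvIsQuote with
        | none => (l.length : Int)
        | some k => ((i + k : Nat) : Int) := by
  rw [pvFindJ, findmod_val l i hi, findmod_val l i hi]
  have hpv : pvIsQuote = (fun c => (c == '\'') || (c == '"')) := rfl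
  rw [hpv, findIdx?_or]
  have bound : ∀ k, (l.drop i).findIdx? (· == '\'') = some k ∨
      (l.drop i).findIdx? (· == '"') = some k → i + k < l.length := by
    intro k hk
    rcases hk with hk | hk <;>
      · rcases List.findIdx?_eq_some_iff_getElem.1 hk with ⟨hlt, _⟩
        rw [List.length_drop] at hlt; omega
  cases h1 : (l.drop i).findIdx? (· == '\'') <;> cases h2 : (l.drop i).findIdx? (· == '"') <;>
    simp only [optMin]
  · simp
  · have := bound _ (Or.inr h2); rw [min_comm]; exact min_eq_left (by exact_mod_cast by omega)
  · have := bound _ (Or.inl h1); exact min_eq_left (by exact_mod_cast by omega)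
  · rename_i a b
    have ha := bound a (Or.inl h1)
    have hb := bound b (Or.inr h2)
    have : min ((i + a : Nat) : Int) ((i + b : Nat) : Int) = ((i + min a b : Nat) : Int) := by
      push_cast; omega
    exact this

-- the main loop invariant: A's loop from i equals B's scan of the remaining suffix
lemma loop_eq_scan : ∀ (fuel : Nat) (l : List Char) (i : Nat), i ≤ l.length →
    l.length - i < fuel → validateLoopA l i fuel = scanB (l.drop i) none := by
  intro fuel
  induction fuel with
  | zero => intro l i hi hf; omega
  | succ f ih =>
    intro l i hi hf
    by_cases hlt : i < l.length
    · rw [validateLoopA]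
      rw [if_pos hlt, j_val l i hi]
      cases hq : (l.drop i).findIdx? pvIsQuote with
      | none =>
        have hnoq : ∀ c ∈ l.drop i, pvIsQuote c = false := List.findIdx?_eq_none_iff.1 hq
        simp only
        have hslice : PySem.List.slice l (some (i : Int)) (some (l.length : Int))
            = l.drop i := by
          rw [PySem.List.slice_natCast]
          exact List.take_of_length_le (by simp)
        rw [hslice, subset_eq_all]
        have hb := scanB_append_clean (l.drop i) [] hnoq
        rw [List.append_nil] at hb
        rw [hb]
        cases hall : (l.drop i).all (fun c => pvAllowedB.contains c) <;> simp [scanB]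
      | some k =>
        obtain ⟨hk, hqk, hkmin⟩ := List.findIdx?_eq_some_iff_getElem.1 hq
        have hklen : i + k < l.length := by rw [List.length_drop] at hk; omega
        simp only
        have hslice : PySem.List.slice l (some (i : Int)) (some ((i + k : Nat) : Int))
            = (l.drop i).take k := by
          rw [PySem.List.slice_natCast]
          congr 1; omega
        rw [hslice, subset_eq_all]
        have hBdecomp : scanB (l.drop i) none =
            if ((l.drop i).take k).all (fun c => pvAllowedB.contains c)
            then scanB ((l.drop i).drop k) none else false := by
          conv_lhs => rw [← List.take_append_drop k (l.drop i)]
          refine scanB_append_clean _ _ (fun c hc => ?_)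
          obtain ⟨jj, hjj, hvv⟩ := List.getElem_of_mem hc
          have hjjk : jj < k := by rw [List.length_take] at hjj; omega
          have hmin := hkmin jj hjjk
          rw [Bool.not_eq_true] at hmin
          rw [← hvv, List.getElem_take]
          exact hmin
        rw [hBdecomp]
        cases hall : ((l.drop i).take k).all (fun c => pvAllowedB.contains c)
        · simp
        · simp only [Bool.not_true, Bool.false_eq_true, if_false, if_true]
          have hbeqF : (((i + k : Nat) : Int) == (l.length : Int)) = false := by
            simp only [beq_eq_false_iff_ne, ne_eq, Int.natCast_inj]
            exact_mod_cast by omega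
          rw [hbeqF]
          simp only [Bool.false_eq_true, if_false]
          have hget : PySem.List.pyGet? l ((i + k : Nat) : Int) = some (l[i + k]'hklen) := by
            rw [PySem.List.pyGet?_natCast]
            exact List.getElem?_eq_some_iff.2 ⟨hklen, rfl⟩
          simp only [hget]
          have hdropik : (l.drop i).drop k = l[i + k]'hklen :: l.drop (i + k + 1) := by
            rw [List.drop_drop, List.drop_eq_getElem_cons hklen]
          have htk : (l.drop i)[k]'hk = l[i + k]'hklen := by
            rw [List.getElem_drop]
          have hquoteq : pvIsQuote (l[i + k]'hklen) = true := htk ▸ hqk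
          rw [hdropik]
          rw [show scanB (l[i + k]'hklen :: l.drop (i + k + 1)) none
                = scanB (l.drop (i + k + 1)) (some (l[i + k]'hklen)) by
              simp [scanB, hquoteq]]
          have hcast : ((i + k : Nat) : Int) + 1 = ((i + k + 1 : Nat) : Int) := by
            push_cast; ring
          rw [hcast, findmod_val l (i + k + 1) (by omega) (l[i + k]'hklen)]
          cases hm : (l.drop (i + k + 1)).findIdx? (· == l[i + k]'hklen) with
          | none =>
            simp only [beq_self_eq_true, if_true]
            rw [List.findIdx?_eq_none_iff] at hm
            have := scanB_append_quoted (l.drop (i + k + 1)) [] (l[i + k]'hklen)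
              (fun c hc => by simpa using hm c hc)
            rw [List.append_nil] at this
            rw [this]
            rfl
          | some m =>
            obtain ⟨hmlt, hmq, hmmin⟩ := List.findIdx?_eq_some_iff_getElem.1 hm
            have hmlen : i + k + 1 + m < l.length := by rw [List.length_drop] at hmlt; omega
            simp only
            have hbeqF2 : (((i + k + 1 + m : Nat) : Int) == (l.length : Int)) = false := by
              simp only [beq_eq_false_iff_ne, ne_eq, Int.natCast_inj]
              exact_mod_cast by omega
            rw [hbeqF2]
            simp only [Bool.false_eq_true, if_false]
            have htonat : (((i + k + 1 + m : Nat) : Int) + 1).toNat = i + k + 1 + m + 1 := by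
              omega
            rw [htonat]
            rw [ih l (i + k + 1 + m + 1) (by omega) (by omega)]
            -- B side: skip the quoted block
            have hBq : scanB (l.drop (i + k + 1)) (some (l[i + k]'hklen))
                = scanB (l.drop (i + k + 1 + m + 1)) none := by
              conv_lhs => rw [← List.take_append_drop m (l.drop (i + k + 1))]
              rw [scanB_append_quoted _ _ _ (fun c hc => ?_)]
              · have hdm : (l.drop (i + k + 1)).drop m
                    = l[i + k + 1 + m]'hmlen :: l.drop (i + k + 1 + m + 1) := by
                  rw [List.drop_drop, List.drop_eq_getElem_cons hmlen]
                have htm : (l.drop (i + k + 1))[m]'hmlt = l[i + k + 1 + m]'hmlen := by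
                  rw [List.getElem_drop]
                have hqeq : (l[i + k + 1 + m]'hmlen == l[i + k]'hklen) = true := htm ▸ hmq
                rw [hdm]
                simp only [scanB, hqeq, if_true]
              · obtain ⟨jj, hjj, hvv⟩ := List.getElem_of_mem hc
                have hjjm : jj < m := by rw [List.length_take] at hjj; omega
                have := hmmin jj hjjm
                rw [← hvv, List.getElem_take]
                intro hcon
                exact this (by simp [hcon])
            rw [hBq]
    · have hieq : i = l.length := by omega
      rw [validateLoopA]
      rw [if_neg hlt]
      subst hieq
      simp [scanB]

-- ===== VERDICT (by name: the statement is the Claim_ definition above) =====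
theorem validate_tag_spec : Claim_equal_validate_tag := by
  intro data _
  unfold Spec_validate_tag validate_tag validate_tag_alt
  exact loop_eq_scan _ _ 0 (Nat.zero_le _) (by omega)
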